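-- pv_equiv track=rewrite | github.com/salargtb/task_vrptw_2024 | LA/util_LA.py | calculate_E_star_uw_dict
-- ===== SOURCE A (Python) =====
-- def calculate_E_star_uw_dict(E_star, N_u, u):
--     """
--     Calculate E_star_uw.
--
--     Args:
--         E_star: Dictionary representing feasible edges (e.g., {(w, v): cost, ...}).
--         N_u: Reduced neighbors for node u (e.g., {v1, v2, ...}).
--         u: The node itself.
--
--     Returns:
--         E_star_uw: Dictionary where keys are (u, w) and values are sets of edges E^*_uw.
--     """
--     N_u_plus = set(N_u) | {u} # Include u itself in N_u^+
--     N_u_to = {v for (_, v) in E_star.keys() if v not in N_u_plus|{1}}  # Next neighbors not in N_u^+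
--
--     E_star_uw = {}
--     for w in N_u_plus:
--         # Collect edges (w, v) where v ∈ N_u_to
--         edges = {(w, v) for (w_, v) in E_star.keys() if w_ == w and v in N_u_to}
--         E_star_uw[(u, w)] = edges
--
--     return E_star_uw
-- ===== SOURCE B (Python) =====
-- def calculate_E_star_uw_dict(E_star, N_u, u):
--     result = {(u, w): set() for w in set(N_u) | {u}}
--     skip = set(N_u) | {u, 1}
--     for (w, v) in E_star:
--         if v not in skip and (u, w) in result:
--             result[(u, w)].add((w, v))
--     return result
-- ===== Notes on version B (the rewrite author's own statement) =====
-- stated objective: faster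
-- what changed: B drops A's intermediate N_u_to set and per-neighbour scan of all edges: it pre-initializes the result dict with an empty set per node of N_u_plus and fills the entries in place with a single pass over E_star's keys, filtering each edge directly against set(N_u)|{u,1}; intended as faster (one pass vs a scan per neighbour) — a timing run measured ~1.6x median at the largest size, varying per input.
import Mathlib
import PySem

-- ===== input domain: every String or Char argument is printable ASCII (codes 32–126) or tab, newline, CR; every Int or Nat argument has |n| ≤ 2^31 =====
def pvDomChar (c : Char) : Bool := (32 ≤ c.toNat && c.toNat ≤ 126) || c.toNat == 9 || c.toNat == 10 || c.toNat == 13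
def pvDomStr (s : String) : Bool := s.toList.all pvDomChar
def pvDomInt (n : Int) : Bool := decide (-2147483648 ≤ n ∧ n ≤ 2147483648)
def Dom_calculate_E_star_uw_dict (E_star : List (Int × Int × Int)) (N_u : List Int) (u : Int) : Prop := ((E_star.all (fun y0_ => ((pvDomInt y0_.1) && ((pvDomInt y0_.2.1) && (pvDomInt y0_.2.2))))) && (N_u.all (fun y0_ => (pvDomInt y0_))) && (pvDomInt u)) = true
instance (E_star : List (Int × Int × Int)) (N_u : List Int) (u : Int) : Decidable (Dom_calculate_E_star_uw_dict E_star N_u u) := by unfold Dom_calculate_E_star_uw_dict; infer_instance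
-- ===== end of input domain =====

-- B drops A's intermediate N_u_to set and per-neighbour comprehension: it pre-builds the
-- result dict with empty sets and fills it with one pass over the edges (intended as faster —
-- one pass instead of a scan per neighbour; a timing run measured ~1.6x median at the
-- largest size, varying run to run between ~0.9x and ~2x per input).
-- The output dict's key order follows the ports' insertion order (Python's set hash
-- order is not modelled); outputs are compared as dicts, ignoring order.

-- ===== PORT A =====
-- E_star is a dict; only its keys (first components of the triples, deduplicated
-- in first-occurrence order like dict keys) are used.
def calculate_E_star_uw_dict (E_star : List (Int × Int × Int)) (N_u : List Int) (u : Int) : List (Int × Int × List (Int × Int)) :=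
  let keys : List (Int × Int) := PySem.List.dedup (E_star.map (fun t => (t.1, t.2.1)))
  let N_u_plus : PySem.Set Int := PySem.Set.add (PySem.Set.ofList N_u) u
  let N_u_to : PySem.Set Int :=
    PySem.Set.ofList ((keys.filter
      (fun p => !(PySem.Set.contains (PySem.Set.union N_u_plus [1]) p.2))).map (fun p => p.2))
  N_u_plus.foldl (fun acc w =>
    let edges : PySem.Set (Int × Int) :=
      PySem.Set.ofList ((keys.filter
        (fun p => p.1 == w && PySem.Set.contains N_u_to p.2)).map (fun p => (w, p.2)))
    acc ++ [(u, w, edges)]) []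

-- ===== PORT B =====
-- Source B: result = {(u, w): set() for w in set(N_u) | {u}}; skip = set(N_u) | {u, 1};
-- then one pass over E_star's keys filling result in place; return result (as triples).
def calculate_E_star_uw_dict_alt (E_star : List (Int × Int × Int)) (N_u : List Int) (u : Int) : List (Int × Int × List (Int × Int)) :=
  let result0 : PySem.Dict (Int × Int) (PySem.Set (Int × Int)) :=
    (PySem.Set.add (PySem.Set.ofList N_u) u).foldl
      (fun d w => d.insert (u, w) PySem.Set.empty) PySem.Dict.empty
  let skip : PySem.Set Int := PySem.Set.union (PySem.Set.ofList N_u) [u, 1]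
  let result :=
    (PySem.List.dedup (E_star.map (fun t => (t.1, t.2.1)))).foldl
      (fun d p =>
        if !(PySem.Set.contains skip p.2) && d.contains (u, p.1) then
          d.modify (u, p.1) PySem.Set.empty (fun s => PySem.Set.add s p)
        else d) result0
  result.items.map (fun e => (e.1.1, e.1.2, e.2))

-- ===== PRECONDITION & SPEC =====
def Spec_calculate_E_star_uw_dict (E_star : List (Int × Int × Int)) (N_u : List Int) (u : Int) (out : List (Int × Int × List (Int × Int))) : Prop := out = calculate_E_star_uw_dict_alt E_star N_u u
instance (E_star : List (Int × Int × Int)) (N_u : List Int) (u : Int) (out : List (Int × Int × List (Int × Int))) : Decidable (Spec_calculate_E_star_uw_dict E_star N_u u out) := by unfold Spec_calculate_E_star_uw_dict; infer_instance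

-- ===== CLAIM (what is proved, stated in full; the proofs are below) =====
def Claim_equal_calculate_E_star_uw_dict : Prop := ∀ (E_star : List (Int × Int × Int)) (N_u : List Int) (u : Int), Dom_calculate_E_star_uw_dict E_star N_u u → Spec_calculate_E_star_uw_dict E_star N_u u (calculate_E_star_uw_dict E_star N_u u)

-- ===== LEMMAS AND PROOFS =====

-- modifying a contained key rewrites that key's entry in place
theorem pv_items_modify_of_contains (d : PySem.Dict (Int × Int) (PySem.Set (Int × Int)))
    (k : Int × Int) (d0 : PySem.Set (Int × Int)) (f : PySem.Set (Int × Int) → PySem.Set (Int × Int))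
    (hc : d.contains k = true) :
    (d.modify k d0 f).items = d.items.map (fun q => if q.1 == k then (k, f (d.getD k d0)) else q) := by
  simp only [PySem.Dict.modify]
  exact PySem.Dict.items_insert_of_contains _ _ hc

-- invariant of B's filling loop: each entry accumulates exactly its matching edges
theorem pv_fill_items (skip : PySem.Set Int) (u : Int) (l : List (Int × Int))
    (d : PySem.Dict (Int × Int) (PySem.Set (Int × Int))) (hnd : d.keys.Nodup) :
    (l.foldl (fun d p =>
        if !(PySem.Set.contains skip p.2) && d.contains (u, p.1) then
          d.modify (u, p.1) PySem.Set.empty (fun s => PySem.Set.add s p)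
        else d) d).items
      = d.items.map (fun e =>
          (e.1, (l.filter (fun p => !(PySem.Set.contains skip p.2) && e.1 == (u, p.1))).foldl
                  (fun s p => PySem.Set.add s p) e.2)) := by
  induction l generalizing d with
  | nil => simp
  | cons p l ih =>
    rw [List.foldl_cons]
    by_cases hs : PySem.Set.contains skip p.2 = true
    · rw [if_neg (by simp only [hs, Bool.not_true, Bool.false_and]; exact Bool.false_ne_true)]
      rw [ih d hnd]
      apply List.map_congr_left
      intro e _
      rw [List.filter_cons, if_neg (by simp only [hs, Bool.not_true, Bool.false_and]; exact Bool.false_ne_true)]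
    · rw [Bool.not_eq_true] at hs
      by_cases hc : d.contains (u, p.1) = true
      · rw [if_pos (by simp only [hs, hc, Bool.not_false, Bool.true_and])]
        have hnd' : (d.modify (u, p.1) PySem.Set.empty (fun s => PySem.Set.add s p)).keys.Nodup := by
          rw [PySem.Dict.keys_modify, PySem.Dict.keys_insert_of_contains _ _ hc]
          exact hnd
        rw [ih _ hnd']
        rw [pv_items_modify_of_contains _ _ _ _ hc, List.map_map]
        apply List.map_congr_left
        intro e he
        simp only [Function.comp]
        by_cases he1 : e.1 = (u, p.1)
        · rw [if_pos (beq_iff_eq.mpr he1)]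
          have he2 : d.getD (u, p.1) PySem.Set.empty = e.2 := by
            obtain ⟨k, v⟩ := e
            simp only at he1
            subst he1
            exact PySem.Dict.getD_of_mem_items d he hnd _
          rw [List.filter_cons,
            if_pos (by simp only [hs, Bool.not_false, Bool.true_and, he1, BEq.rfl])]
          rw [List.foldl_cons, he2, he1]
        · rw [if_neg (by simp only [beq_iff_eq]; exact fun h => he1 h)]
          rw [List.filter_cons,
            if_neg (by simp only [Bool.and_eq_true, beq_iff_eq]; exact fun h => he1 h.2)]
      · rw [Bool.not_eq_true] at hc
        rw [if_neg (by simp only [hc, Bool.and_false]; exact Bool.false_ne_true)]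
        rw [ih d hnd]
        apply List.map_congr_left
        intro e he
        have he1 : e.1 ≠ (u, p.1) := by
          intro h
          have := PySem.Dict.mem_keys_of_mem_items d he
          rw [h] at this
          have htrue := (PySem.Dict.contains_iff_mem_keys d _).mpr this
          rw [hc] at htrue
          exact Bool.noConfusion htrue
        rw [List.filter_cons, if_neg (by simp only [Bool.and_eq_true, beq_iff_eq]; exact fun h => he1 h.2)]

-- membership in A's N_u_to
theorem pv_mem_nuto (excluded : PySem.Set Int) (ks : List (Int × Int)) (v : Int) :
    v ∈ PySem.Set.ofList ((ks.filter
        (fun p => !(PySem.Set.contains excluded p.2))).map (fun p => p.2))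
      ↔ ∃ p ∈ ks, p.2 = v ∧ PySem.Set.contains excluded p.2 = false := by
  simp [PySem.Set.mem_ofList, List.mem_filter, List.mem_map]

theorem pv_foldl_add_eq_ofList (l : List (Int × Int)) :
    List.foldl (fun s p => PySem.Set.add s p) PySem.Set.empty l = PySem.Set.ofList l :=
  (PySem.Set.ofList_eq_foldl l).symm

-- ===== VERDICT (by name: the statement is the Claim_ definition above) =====
theorem calculate_E_star_uw_dict_spec : Claim_equal_calculate_E_star_uw_dict := by
  intro E_star N_u u _
  unfold Spec_calculate_E_star_uw_dict calculate_E_star_uw_dict calculate_E_star_uw_dict_alt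
  simp only []
  rw [show PySem.Set.union (PySem.Set.ofList N_u) [u, 1]
        = PySem.Set.union (PySem.Set.add (PySem.Set.ofList N_u) u) [1] from rfl]
  set keys : List (Int × Int) := PySem.List.dedup (E_star.map (fun t => (t.1, t.2.1)))
  set N_u_plus : PySem.Set Int := PySem.Set.add (PySem.Set.ofList N_u) u
  set excluded : PySem.Set Int := PySem.Set.union N_u_plus [1]
  -- B's initial dict: one empty entry per element of N_u_plus
  have hnp : (N_u_plus : List Int).Nodup :=
    PySem.Set.nodup_add _ _ (PySem.Set.nodup_ofList N_u)
  have h0 : ((N_u_plus.foldl (fun d w => d.insert (u, w) PySem.Set.empty)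
        (PySem.Dict.empty : PySem.Dict (Int × Int) (PySem.Set (Int × Int))))).items
      = N_u_plus.map (fun w => ((u, w), PySem.Set.empty)) := by
    rw [PySem.Dict.items_foldl_insert_fresh N_u_plus (fun w => (u, w))
      (fun _ => PySem.Set.empty) PySem.Dict.empty
      (fun a _ => PySem.Dict.contains_empty _)
      ((List.nodup_map_iff_inj_on hnp).mpr (fun a _ b _ h => by
        exact congrArg Prod.snd h))]
    rfl
  have hnd0 : ((N_u_plus.foldl (fun d w => d.insert (u, w) PySem.Set.empty)
        (PySem.Dict.empty : PySem.Dict (Int × Int) (PySem.Set (Int × Int))))).keys.Nodup := by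
    exact PySem.Dict.nodup_keys_foldl_insert_key _ _ _ _ PySem.Dict.nodup_keys_empty
  rw [PySem.List.foldl_append_singleton_eq_map, pv_fill_items _ _ _ _ hnd0, h0,
    List.map_map, List.map_map, List.nil_append]
  apply List.map_congr_left
  intro w _
  simp only [Function.comp]
  refine congrArg (fun l => (u, w, l)) ?_
  rw [pv_foldl_add_eq_ofList]
  -- the two filters select the same edges
  have hfeq : keys.filter (fun p => p.1 == w
        && PySem.Set.contains (PySem.Set.ofList ((keys.filter
            (fun p => !(PySem.Set.contains excluded p.2))).map (fun p => p.2))) p.2)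
      = keys.filter (fun p => !(PySem.Set.contains excluded p.2) && ((u, w) == (u, p.1))) := by
    apply List.filter_congr
    intro p hp
    have hmain : (PySem.Set.contains (PySem.Set.ofList ((keys.filter
          (fun p => !(PySem.Set.contains excluded p.2))).map (fun p => p.2))) p.2)
        = !(PySem.Set.contains excluded p.2) := by
      cases hc : PySem.Set.contains excluded p.2 with
      | false =>
        rw [Bool.not_false]
        rw [PySem.Set.contains_iff, pv_mem_nuto]
        exact ⟨p, hp, rfl, hc⟩
      | true =>
        rw [Bool.not_true, Bool.eq_false_iff, Ne, PySem.Set.contains_iff, pv_mem_nuto]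
        rintro ⟨q, hq, hq2, hqf⟩
        rw [hq2, hc] at hqf
        exact Bool.noConfusion hqf
    rw [hmain]
    have hpair : ((u, w) == (u, p.1)) = (p.1 == w) := by
      rw [Bool.eq_iff_iff, beq_iff_eq, beq_iff_eq, Prod.mk.injEq]
      exact ⟨fun h => h.2.symm, fun h => ⟨rfl, h.symm⟩⟩
    rw [hpair, Bool.and_comm]
  rw [hfeq]
  refine congrArg PySem.Set.ofList ?_
  have hid : ∀ p ∈ keys.filter (fun p => !(PySem.Set.contains excluded p.2) && ((u, w) == (u, p.1))),
      (fun p : Int × Int => (w, p.2)) p = id p := by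
    intro p hp
    have hpw := List.of_mem_filter hp
    simp only [Bool.and_eq_true, beq_iff_eq, Prod.mk.injEq] at hpw
    simp [hpw.2.2]
  rw [List.map_congr_left hid, List.map_id]
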